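-- pv_equiv track=rewrite | github.com/mjbenitez95/practice | 2_hashing/3_more_hashing_examples/2_duplicate_cards.py | duplicate_cards_hashing
-- ===== SOURCE A (Python) =====
-- def duplicate_cards_hashing(cards):
--     ans = float('inf')
--     cards_indices = {}
--
--     for index, card in enumerate(cards):
--         if card not in cards_indices:
--             cards_indices[card] = []
--
--         cards_indices[card].append(index)
--
--     for card in cards_indices:
--         arr = cards_indices[card]
--         for i in range(len(arr) - 1):
--             ans = min(ans, arr[i+1] - arr[i] + 1)
--
--     return ans if ans < float('inf') else -1
-- ===== SOURCE B (Python) =====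
-- def duplicate_cards_hashing(cards):
--     best = None
--     last = {}
--     for index, card in enumerate(cards):
--         if card in last:
--             gap = index - last[card] + 1
--             if best is None or gap < best:
--                 best = gap
--         last[card] = index
--     return -1 if best is None else best
-- ===== Notes on version B (the rewrite author's own statement) =====
-- stated objective: simpler
-- what changed: Single pass keeping only the last index seen per card (the minimum gap is always between consecutive occurrences), instead of grouping all indices per card into lists and then scanning every list of consecutive pairs in a second nested loop.
import Mathlib
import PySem

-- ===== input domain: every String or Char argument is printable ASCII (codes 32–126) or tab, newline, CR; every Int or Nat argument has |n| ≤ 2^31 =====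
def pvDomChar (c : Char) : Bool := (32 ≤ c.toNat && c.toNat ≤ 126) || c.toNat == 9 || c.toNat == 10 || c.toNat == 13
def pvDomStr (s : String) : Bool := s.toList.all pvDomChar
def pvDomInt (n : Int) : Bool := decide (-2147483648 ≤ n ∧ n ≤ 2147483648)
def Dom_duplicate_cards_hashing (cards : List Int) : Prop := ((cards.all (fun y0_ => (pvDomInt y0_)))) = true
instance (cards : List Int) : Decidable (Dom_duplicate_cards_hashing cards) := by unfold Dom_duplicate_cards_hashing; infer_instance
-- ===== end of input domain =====

-- B replaces A's grouping of all indices per card (dict of lists, then a second nested loop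
-- over consecutive index pairs) by a single pass keeping only the last index seen per card:
-- the minimum gap is always realised between consecutive occurrences.  Objective: simpler.

-- ===== PORT A =====
-- Python's `ans = float('inf')` is represented as `Option Int` (none = inf); `min(ans, v)`
-- is minOptA — exact here since every other compared value is an Int.
def minOptA (a : Option Int) (v : Int) : Option Int :=
  match a with
  | none => some v
  | some x => some (min x v)

def duplicate_cards_hashing (cards : List Int) : Int :=
  -- first loop: `if card not in cards_indices: cards_indices[card] = []` then append(index)
  let d := (PySem.List.enumerate cards).foldl
      (fun d p => d.modify p.2 [] (fun l => l ++ [p.1])) PySem.Dict.empty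
  -- second loop: for card in cards_indices: arr = cards_indices[card]; for i in range(len(arr)-1): …
  -- arr[i] / arr[i+1] ported with pyGetD 0: both indices are in range for i in range(len(arr)-1)
  let ans := d.keys.foldl
      (fun ans card =>
        let arr := d.getD card []
        (PySem.List.pyRange 0 ((arr.length : Int) - 1) 1).foldl
          (fun a i =>
            minOptA a (PySem.List.pyGetD arr (i + 1) 0 - PySem.List.pyGetD arr i 0 + 1)) ans)
      none
  -- return ans if ans < float('inf') else -1
  match ans with
  | some v => v
  | none => -1

-- ===== PORT B =====
-- Python's `best = None` is Option Int; one loop body step of Source B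
def bstepB (st : PySem.Dict Int Int × Option Int) (p : Int × Int) :
    PySem.Dict Int Int × Option Int :=
  let best :=
    if st.1.contains p.2 then
      let gap := p.1 - st.1.getD p.2 0 + 1
      match st.2 with
      | none => some gap
      | some b => if gap < b then some gap else some b
    else st.2
  (st.1.insert p.2 p.1, best)

def duplicate_cards_hashing_alt (cards : List Int) : Int :=
  let st := (PySem.List.enumerate cards).foldl bstepB (PySem.Dict.empty, none)
  match st.2 with
  | some v => v
  | none => -1

-- ===== PRECONDITION & SPEC =====
def Spec_duplicate_cards_hashing (cards : List Int) (out : Int) : Prop := out = duplicate_cards_hashing_alt cards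
instance (cards : List Int) (out : Int) : Decidable (Spec_duplicate_cards_hashing cards out) := by unfold Spec_duplicate_cards_hashing; infer_instance

-- ===== CLAIM (what is proved, stated in full; the proofs are below) =====
def Claim_equal_duplicate_cards_hashing : Prop := ∀ (cards : List Int), Dom_duplicate_cards_hashing cards → Spec_duplicate_cards_hashing cards (duplicate_cards_hashing cards)

-- ===== LEMMAS AND PROOFS =====

-- gaps between consecutive entries of a list
def adjGaps (xs : List Int) : List Int := (xs.zip xs.tail).map (fun p => p.2 - p.1 + 1)

-- the (0-based) indices at which card c occurs in p
def occI (p : List Int) (c : Int) : List Int :=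
  ((PySem.List.enumerate p).filter (fun q => q.2 == c)).map (·.1)

-- the index of the last occurrence of c (0 if absent)
def lastOcc (p : List Int) (c : Int) : Int := ((occI p c).getLast?).getD 0

-- all consecutive-occurrence gaps, grouped per distinct card
def allA (p : List Int) : List Int :=
  (PySem.Set.ofList p).flatMap (fun c => adjGaps (occI p c))

theorem minOptA_comm (a : Option Int) (u v : Int) :
    minOptA (minOptA a u) v = minOptA (minOptA a v) u := by
  cases a <;> simp [minOptA, min_assoc, min_comm u v]

theorem foldl_minOptA_out (l : List Int) (a : Option Int) (v : Int) :
    l.foldl minOptA (minOptA a v) = minOptA (l.foldl minOptA a) v := by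
  induction l generalizing a with
  | nil => rfl
  | cons h t ih => simp only [List.foldl_cons, minOptA_comm a v h, ih]

theorem range_map_eq (arr : List Int) :
    (List.range (arr.length - 1)).map
      (fun (k : Nat) => PySem.List.pyGetD arr ((k : Int) + 1) 0 - PySem.List.pyGetD arr (k : Int) 0 + 1)
      = adjGaps arr := by
  apply List.ext_getElem
  · simp [adjGaps]
  · intro k h1 h2
    simp only [List.getElem_map, List.getElem_range, adjGaps, List.getElem_zip, List.getElem_tail]
    have hk : k + 1 < arr.length := by simp at h1; omega
    have e1 : ((k : Int) + 1) = ((k + 1 : Nat) : Int) := by push_cast; ring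
    rw [e1, PySem.List.pyGetD_natCast, PySem.List.pyGetD_natCast,
        List.getD_eq_getElem _ _ hk, List.getD_eq_getElem _ _ (by omega)]

theorem inner_eq (arr : List Int) (a : Option Int) :
    (PySem.List.pyRange 0 ((arr.length : Int) - 1) 1).foldl
      (fun a i =>
        minOptA a (PySem.List.pyGetD arr (i + 1) 0 - PySem.List.pyGetD arr i 0 + 1)) a
    = (adjGaps arr).foldl minOptA a := by
  rw [PySem.List.pyRange_one, List.foldl_map, ← range_map_eq arr, List.foldl_map]
  have h : ((arr.length : Int) - 1 - 0).toNat = arr.length - 1 := by omega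
  rw [h]
  simp

theorem keysfold (ks : List Int) (g : Int → List Int) (a : Option Int) :
    ks.foldl (fun a c => (g c).foldl minOptA a) a = (ks.flatMap g).foldl minOptA a := by
  induction ks generalizing a with
  | nil => rfl
  | cons h t ih => simp [List.flatMap_cons, List.foldl_append, ih]

theorem build_getD (p : List Int) (c : Int) :
    (((PySem.List.enumerate p).foldl
        (fun d q => d.modify q.2 [] (fun l => l ++ [q.1])) PySem.Dict.empty).getD c [])
      = occI p c := by
  have h : (PySem.List.enumerate p).foldl
      (fun d q => d.modify q.2 [] (fun l => l ++ [q.1])) PySem.Dict.empty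
      = ((PySem.List.enumerate p).map (fun q => (q.2, q.1))).foldl
        (fun d r => d.modify r.1 [] (fun l => l ++ [r.2])) PySem.Dict.empty := by
    rw [List.foldl_map]
  rw [h, PySem.Dict.getD_foldl_modify_append]
  simp [occI, PySem.Dict.getD_empty, List.filter_map, Function.comp_def, List.map_map]

theorem build_keys (p : List Int) :
    ((PySem.List.enumerate p).foldl
        (fun d q => d.modify q.2 [] (fun l => l ++ [q.1])) PySem.Dict.empty).keys
      = PySem.Set.ofList p := by
  rw [PySem.Dict.keys_foldl_modify_key (key := fun q : Int × Int => q.2)]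
  simp [PySem.List.map_snd_enumerate, PySem.Set.update_nil_left]

theorem A_char (cards : List Int) :
    duplicate_cards_hashing cards =
      match (allA cards).foldl minOptA none with
      | some v => v
      | none => -1 := by
  unfold duplicate_cards_hashing
  simp only [inner_eq, build_getD, build_keys, keysfold]
  rfl

theorem adjGaps_cons (x : Int) (t : List Int) :
    adjGaps (x :: t) = match t with | [] => [] | h :: _ => (h - x + 1) :: adjGaps t := by
  cases t <;> simp [adjGaps]

theorem adjGaps_append (xs : List Int) (v : Int) :
    adjGaps (xs ++ [v]) =
      adjGaps xs ++ (match xs.getLast? with | none => [] | some L => [v - L + 1]) := by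
  induction xs with
  | nil => simp [adjGaps]
  | cons x t ih =>
    cases t with
    | nil => simp [adjGaps]
    | cons y s =>
      rw [List.cons_append, adjGaps_cons]
      show (y - x + 1) :: adjGaps (y :: s ++ [v]) = _
      rw [ih]
      simp [adjGaps_cons, List.getLast?_cons_cons]

theorem occI_append (p : List Int) (c d : Int) :
    occI (p ++ [c]) d = occI p d ++ (if d = c then [(p.length : Int)] else []) := by
  rw [occI, PySem.List.enumerate_append]
  simp only [PySem.List.enumerate_cons, PySem.List.enumerate_nil, List.filter_append, List.map_append]
  by_cases h : d = c <;> simp [occI, h, beq_iff_eq]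
  omega


theorem occI_eq_nil_iff (p : List Int) (c : Int) : occI p c = [] ↔ c ∉ p := by
  simp only [occI, List.map_eq_nil_iff, List.filter_eq_nil_iff, PySem.List.mem_enumerate_iff]
  constructor
  · intro h hc
    obtain ⟨k, hk, he⟩ := List.mem_iff_getElem.mp hc
    exact absurd (by simp [← he]) (h (0 + (k:Int), p[k]) ⟨k, hk, rfl⟩)
  · intro h q hq
    obtain ⟨k, hk, rfl⟩ := hq
    simp only [beq_iff_eq]
    intro hc
    exact h (hc ▸ List.getElem_mem hk)

theorem minF_pull (x gc y : List Int) (v : Int) :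
    (x ++ (gc ++ [v]) ++ y).foldl minOptA none
      = minOptA ((x ++ gc ++ y).foldl minOptA none) v := by
  simp [List.foldl_append, foldl_minOptA_out]

theorem allA_min_append (p : List Int) (c : Int) :
    (allA (p ++ [c])).foldl minOptA none =
      if c ∈ p then
        minOptA ((allA p).foldl minOptA none) ((p.length : Int) - lastOcc p c + 1)
      else (allA p).foldl minOptA none := by
  unfold allA
  rw [PySem.Set.ofList_append_singleton]
  have hocc : ∀ d ∈ PySem.Set.ofList p, adjGaps (occI (p ++ [c]) d) = adjGaps (occI p d) ∨ d = c := by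
    intro d hd
    by_cases hdc : d = c
    · right; exact hdc
    · left; rw [occI_append, if_neg hdc, List.append_nil]
  by_cases hc : c ∈ p
  · rw [if_pos hc]
    have hadd : PySem.Set.add (PySem.Set.ofList p) c = PySem.Set.ofList p := by
      simp [PySem.Set.add, PySem.Set.contains, (PySem.Set.mem_ofList p c).mpr hc]
    rw [hadd]
    obtain ⟨s₁, s₂, hsplit⟩ := List.mem_iff_append.mp ((PySem.Set.mem_ofList p c).mpr hc)
    have hnd := PySem.Set.nodup_ofList p
    rw [hsplit] at hnd
    have hc1 : c ∉ s₁ := by simp [List.nodup_append] at hnd; exact fun h => (hnd.2.2 c h).1 rfl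
    have hc2 : c ∉ s₂ := by simp [List.nodup_append, List.nodup_cons] at hnd; tauto
    -- occ of c is nonempty: last element L
    have hne : occI p c ≠ [] := by rw [ne_eq, occI_eq_nil_iff]; simpa using hc
    obtain ⟨L, hL⟩ : ∃ L, (occI p c).getLast? = some L := by
      cases h : (occI p c).getLast? with
      | none => exact absurd (List.getLast?_eq_none_iff.mp h) hne
      | some L => exact ⟨L, rfl⟩
    have hLo : lastOcc p c = L := by simp [lastOcc, hL]
    rw [hsplit]
    simp only [List.flatMap_append, List.flatMap_cons]
    have e1 : s₁.flatMap (fun d => adjGaps (occI (p ++ [c]) d)) = s₁.flatMap (fun d => adjGaps (occI p d)) := by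
      apply List.flatMap_congr
      intro d hd
      rw [occI_append, if_neg (by rintro rfl; exact hc1 hd), List.append_nil]
    have e2 : s₂.flatMap (fun d => adjGaps (occI (p ++ [c]) d)) = s₂.flatMap (fun d => adjGaps (occI p d)) := by
      apply List.flatMap_congr
      intro d hd
      rw [occI_append, if_neg (by rintro rfl; exact hc2 hd), List.append_nil]
    have e3 : adjGaps (occI (p ++ [c]) c)
        = adjGaps (occI p c) ++ [(p.length : Int) - L + 1] := by
      rw [occI_append, if_pos rfl, adjGaps_append, hL]
    rw [e1, e2, e3, hLo]
    rw [show s₁.flatMap (fun d => adjGaps (occI p d)) ++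
          (adjGaps (occI p c) ++ [(p.length : Int) - L + 1] ++
            s₂.flatMap (fun d => adjGaps (occI p d)))
        = s₁.flatMap (fun d => adjGaps (occI p d)) ++
          (adjGaps (occI p c) ++ [(p.length : Int) - L + 1]) ++
            s₂.flatMap (fun d => adjGaps (occI p d)) by simp]
    rw [minF_pull]
    simp [List.append_assoc]
  · rw [if_neg hc]
    have hadd : PySem.Set.add (PySem.Set.ofList p) c = PySem.Set.ofList p ++ [c] := by
      simp [PySem.Set.add, PySem.Set.contains]
      intro h
      exact absurd h hc
    rw [hadd]
    simp only [List.flatMap_append, List.flatMap_cons, List.flatMap_nil]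
    have e0 : occI p c = [] := (occI_eq_nil_iff p c).mpr hc
    have e3 : adjGaps (occI (p ++ [c]) c) = [] := by
      rw [occI_append, if_pos rfl, e0]
      rfl
    have e1 : (PySem.Set.ofList p).flatMap (fun d => adjGaps (occI (p ++ [c]) d))
        = (PySem.Set.ofList p).flatMap (fun d => adjGaps (occI p d)) := by
      apply List.flatMap_congr
      intro d hd
      rw [occI_append, if_neg (by rintro rfl; exact hc ((PySem.Set.mem_ofList p d).mp hd)), List.append_nil]
    rw [e3, e1]
    simp


theorem B_inv (p : List Int) :
    (∀ c : Int, ((PySem.List.enumerate p).foldl bstepB (PySem.Dict.empty, none)).1.contains c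
        = decide (c ∈ p))
  ∧ (∀ c ∈ p, ((PySem.List.enumerate p).foldl bstepB (PySem.Dict.empty, none)).1.getD c 0
        = lastOcc p c)
  ∧ ((PySem.List.enumerate p).foldl bstepB (PySem.Dict.empty, none)).2
        = (allA p).foldl minOptA none := by
  induction p using List.reverseRecOn with
  | nil =>
    refine ⟨?_, ?_, ?_⟩ <;> simp [PySem.List.enumerate_nil, allA, PySem.Dict.contains_empty]
  | append_singleton p c ih =>
    obtain ⟨ih1, ih2, ih3⟩ := ih
    have hen : PySem.List.enumerate (p ++ [c])
        = PySem.List.enumerate p ++ [((p.length : Int), c)] := by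
      rw [PySem.List.enumerate_append]
      simp [PySem.List.enumerate_cons, PySem.List.enumerate_nil]
    rw [hen, List.foldl_append]
    set st := (PySem.List.enumerate p).foldl bstepB (PySem.Dict.empty, none) with hst
    simp only [List.foldl_cons, List.foldl_nil]
    refine ⟨?_, ?_, ?_⟩
    · intro c'
      show (st.1.insert c (p.length : Int)).contains c' = _
      rw [PySem.Dict.contains_insert, ih1]
      by_cases hcc : c' = c <;> simp [hcc]
    · intro c' hc'
      show (st.1.insert c (p.length : Int)).getD c' 0 = _
      by_cases hcc : c' = c
      · subst hcc
        rw [PySem.Dict.getD_insert_self, lastOcc, occI_append, if_pos rfl,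
            List.getLast?_concat]
        rfl
      · have hcp : c' ∈ p := by
          rcases List.mem_append.mp hc' with h | h
          · exact h
          · exact absurd (List.mem_singleton.mp h) hcc
        rw [PySem.Dict.getD_insert, if_neg hcc, lastOcc, occI_append,
            if_neg hcc, List.append_nil, ← lastOcc]
        exact ih2 c' hcp
    · show (bstepB st ((p.length : Int), c)).2 = _
      rw [allA_min_append]
      by_cases hc : c ∈ p
      · have hg : st.1.getD c 0 = lastOcc p c := ih2 c hc
        simp only [bstepB, ih1, hc, decide_true, if_pos, hg, ih3]
        cases h3 : (allA p).foldl minOptA none with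
        | none => simp [minOptA]
        | some b =>
          simp only [minOptA]
          split_ifs with h <;> simp [min_def] <;> omega
      · simp [bstepB, ih1, hc, ih3]

theorem B_char (cards : List Int) :
    duplicate_cards_hashing_alt cards =
      match (allA cards).foldl minOptA none with
      | some v => v
      | none => -1 := by
  show (match (List.foldl bstepB (PySem.Dict.empty, none) (PySem.List.enumerate cards)).2 with
        | some v => v | none => -1)
      = match (allA cards).foldl minOptA none with | some v => v | none => -1
  rw [(B_inv cards).2.2]

-- ===== VERDICT (by name: the statement is the Claim_ definition above) =====
theorem duplicate_cards_hashing_spec : Claim_equal_duplicate_cards_hashing := by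
  intro cards _
  unfold Spec_duplicate_cards_hashing
  rw [A_char, B_char]
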